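-- pv_equiv track=rewrite | github.com/sujanian3179/ImageSegmentationAndEnhacement | src/crop_hog_person_then_face.py | assign_face_to_person
-- ===== SOURCE A (Python) =====
-- from typing import Dict, List, Optional, Tuple
--
-- def face_center(face_xywh: Tuple[int, int, int, int]) -> Tuple[int, int]:
--     """
--     Compute center point of face box.
--
--     If face bbox is (x,y,w,h):
--       center_x = x + w/2
--       center_y = y + h/2
--
--     Why use face center?
--       It's a robust reference point that should lie inside the person's bbox.
--     """
--     x, y, w, h = face_xywh
--     return (x + w // 2, y + h // 2)
--
-- def point_inside_box(pt: Tuple[int, int], box_xywh: Tuple[int, int, int, int]) -> bool: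
--     """
--     Check if a point lies inside a rectangle box.
--
--     pt = (px, py)
--     box = (x, y, w, h)
--
--     returns True if:
--       x <= px <= x+w  AND  y <= py <= y+h
--     """
--     px, py = pt
--     x, y, w, h = box_xywh
--     return (x <= px <= x + w) and (y <= py <= y + h)
--
-- def assign_face_to_person(
--     face_xywh: Tuple[int, int, int, int],
--     people_xywh: List[Tuple[int, int, int, int]],
-- ) -> Optional[Tuple[int, int, int, int]]:
--     """
--     Assign each face to the most plausible person bbox.
--
--     Step-by-step:
--       1) Compute face center (cx, cy).
--       2) Find all person boxes that contain this center.
--          (If none contain it => return None)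
--       3) Choose the smallest area person box among candidates.
--          Why smallest?
--            If there is a giant person box covering multiple people,
--            smallest box is more likely to correspond to the actual person.
--
--     Returns:
--       person bbox (x,y,w,h) or None.
--     """
--     c = face_center(face_xywh)
--
--     # Filter only those person boxes where face center lies inside
--     candidates = [p for p in people_xywh if point_inside_box(c, p)]
--
--     # If no candidates => HOG failed / person bbox not covering face
--     if not candidates:
--         return None
--
--     # Choose smallest bbox area => best specific match
--     candidates.sort(key=lambda b: b[2] * b[3])
--     return candidates[0]
-- ===== SOURCE B (Python) =====
-- def _consider(best, p, cx, cy):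
--     # keep 'best' = (box, area) of the first strictly-smallest containing box so far
--     px, py, pw, ph = p
--     if px <= cx <= px + pw and py <= cy <= py + ph:
--         area = pw * ph
--         if best is None or area < best[1]:
--             return (p, area)
--     return best
--
-- def assign_face_to_person(face_xywh, people_xywh):
--     # One pass: no candidate list, no sort.
--     x, y, w, h = face_xywh
--     cx, cy = x + w // 2, y + h // 2
--     best = None
--     for p in people_xywh:
--         best = _consider(best, p, cx, cy)
--     return None if best is None else best[0]
-- ===== Notes on version B (the rewrite author's own statement) =====
-- stated objective: faster
-- what changed: Replaced the filter-then-stable-sort-then-take-first pipeline with a single pass that maintains the first strictly-smallest containing box and its area.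
import Mathlib
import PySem

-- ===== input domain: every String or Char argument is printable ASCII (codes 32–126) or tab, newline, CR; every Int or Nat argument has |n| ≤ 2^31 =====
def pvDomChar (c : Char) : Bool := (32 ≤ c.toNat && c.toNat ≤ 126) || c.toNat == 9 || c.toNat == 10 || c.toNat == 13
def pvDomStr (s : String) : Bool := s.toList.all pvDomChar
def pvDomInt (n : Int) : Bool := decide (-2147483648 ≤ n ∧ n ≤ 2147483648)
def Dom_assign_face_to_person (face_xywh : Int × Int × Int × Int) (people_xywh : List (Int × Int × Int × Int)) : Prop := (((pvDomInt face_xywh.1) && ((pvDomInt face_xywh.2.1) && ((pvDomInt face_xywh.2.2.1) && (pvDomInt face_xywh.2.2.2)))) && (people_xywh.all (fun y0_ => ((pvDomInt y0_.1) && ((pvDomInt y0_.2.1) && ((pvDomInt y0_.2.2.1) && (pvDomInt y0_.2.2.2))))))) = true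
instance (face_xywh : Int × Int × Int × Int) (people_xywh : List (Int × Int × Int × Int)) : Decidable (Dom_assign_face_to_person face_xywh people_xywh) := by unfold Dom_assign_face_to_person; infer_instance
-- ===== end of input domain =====

-- ===== PORT A =====
-- B replaces A's filter + stable sort + take-first with one pass keeping the first strictly-smallest containing box.
def face_center (face_xywh : Int × Int × Int × Int) : Int × Int :=
  (face_xywh.1 + PySem.Int.floordiv face_xywh.2.2.1 2,
   face_xywh.2.1 + PySem.Int.floordiv face_xywh.2.2.2 2)

def point_inside_box (pt : Int × Int) (box_xywh : Int × Int × Int × Int) : Bool :=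
  decide (box_xywh.1 ≤ pt.1 ∧ pt.1 ≤ box_xywh.1 + box_xywh.2.2.1) &&
  decide (box_xywh.2.1 ≤ pt.2 ∧ pt.2 ≤ box_xywh.2.1 + box_xywh.2.2.2)

def assign_face_to_person (face_xywh : Int × Int × Int × Int) (people_xywh : List (Int × Int × Int × Int)) : Option (Int × Int × Int × Int) :=
  let c := face_center face_xywh
  let candidates := people_xywh.filter (fun p => point_inside_box c p)
  if candidates.isEmpty then none
  else (PySem.List.sorted candidates (fun b => b.2.2.1 * b.2.2.2) false).head?

-- ===== PORT B =====
-- helper mirroring Source B's _consider (the loop body)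
def considerBox (best : Option ((Int × Int × Int × Int) × Int)) (p : Int × Int × Int × Int) (cx cy : Int) : Option ((Int × Int × Int × Int) × Int) :=
  if p.1 ≤ cx ∧ cx ≤ p.1 + p.2.2.1 ∧ p.2.1 ≤ cy ∧ cy ≤ p.2.1 + p.2.2.2 then
    let area := p.2.2.1 * p.2.2.2
    match best with
    | none => some (p, area)
    | some b => if area < b.2 then some (p, area) else best
  else best

def assign_face_to_person_alt (face_xywh : Int × Int × Int × Int) (people_xywh : List (Int × Int × Int × Int)) : Option (Int × Int × Int × Int) :=
  let cx := face_xywh.1 + PySem.Int.floordiv face_xywh.2.2.1 2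
  let cy := face_xywh.2.1 + PySem.Int.floordiv face_xywh.2.2.2 2
  let best := people_xywh.foldl (fun best p => considerBox best p cx cy) none
  best.map Prod.fst
-- ===== PRECONDITION & SPEC =====
def Spec_assign_face_to_person (face_xywh : Int × Int × Int × Int) (people_xywh : List (Int × Int × Int × Int)) (out : Option (Int × Int × Int × Int)) : Prop := out = assign_face_to_person_alt face_xywh people_xywh
instance (face_xywh : Int × Int × Int × Int) (people_xywh : List (Int × Int × Int × Int)) (out : Option (Int × Int × Int × Int)) : Decidable (Spec_assign_face_to_person face_xywh people_xywh out) := by unfold Spec_assign_face_to_person; infer_instance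

-- ===== CLAIM (what is proved, stated in full; the proofs are below) =====
def Claim_equal_assign_face_to_person : Prop := ∀ (face_xywh : Int × Int × Int × Int) (people_xywh : List (Int × Int × Int × Int)), Dom_assign_face_to_person face_xywh people_xywh → Spec_assign_face_to_person face_xywh people_xywh (assign_face_to_person face_xywh people_xywh)

-- ===== LEMMAS AND PROOFS =====

-- "first strict minimum by area" running state, the common reading of both programs
def minStep (st : Option (Int × Int × Int × Int)) (x : Int × Int × Int × Int) : Option (Int × Int × Int × Int) :=
  match st with
  | none => some x
  | some m => if x.2.2.1 * x.2.2.2 < m.2.2.1 * m.2.2.2 then some x else some m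

def withArea (b : Int × Int × Int × Int) : (Int × Int × Int × Int) × Int := (b, b.2.2.1 * b.2.2.2)

-- head of an insertBy step: the new head is x iff x sorts strictly before the old head
theorem insertBy_head? {α : Type} (bef : α → α → Bool) (x : α) (ys : List α) :
    (PySem.List.insertBy bef x ys).head? =
      some (match ys with | [] => x | y :: _ => if bef x y then x else y) := by
  cases ys with
  | nil => rfl
  | cons y t =>
    simp only [PySem.List.insertBy]
    split <;> simp_all

-- head of A's insertion-sort fold is the running first-strict-minimum fold
theorem foldl_insertBy_head? (l : List (Int × Int × Int × Int)) :
    ∀ (acc : List (Int × Int × Int × Int)),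
      (l.foldl (fun acc x => PySem.List.insertBy
          (fun a b => decide (a.2.2.1 * a.2.2.2 < b.2.2.1 * b.2.2.2)) x acc) acc).head?
      = l.foldl minStep acc.head? := by
  induction l with
  | nil => intro acc; rfl
  | cons x t ih =>
    intro acc
    simp only [List.foldl_cons]
    rw [ih]
    congr 1
    cases acc with
    | nil => rfl
    | cons y ys =>
      rw [insertBy_head?]
      simp only [List.head?_cons, minStep]
      split <;> simp_all

-- B's considerBox fold over the raw list is A's minStep fold over the filtered list (paired with its area)
theorem foldl_considerBox (cx cy : Int) (l : List (Int × Int × Int × Int)) :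
    ∀ (m : Option (Int × Int × Int × Int)),
      l.foldl (fun best p => considerBox best p cx cy) (m.map withArea)
      = ((l.filter (fun p => point_inside_box (cx, cy) p)).foldl minStep m).map withArea := by
  induction l with
  | nil => intro m; rfl
  | cons p t ih =>
    intro m
    simp only [List.foldl_cons, List.filter_cons]
    by_cases hc : p.1 ≤ cx ∧ cx ≤ p.1 + p.2.2.1 ∧ p.2.1 ≤ cy ∧ cy ≤ p.2.1 + p.2.2.2
    · have hb : point_inside_box (cx, cy) p = true := by
        simp only [point_inside_box, Bool.and_eq_true, decide_eq_true_eq]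
        tauto
      rw [hb]
      simp only [if_pos trivial]
      cases m with
      | none =>
        simp only [Option.map_none, considerBox, if_pos hc, minStep, List.foldl_cons]
        exact ih (some p)
      | some b =>
        simp only [Option.map_some, considerBox, if_pos hc, minStep, List.foldl_cons, withArea]
        by_cases hlt : p.2.2.1 * p.2.2.2 < b.2.2.1 * b.2.2.2
        · simp only [if_pos hlt]
          exact ih (some p)
        · simp only [if_neg hlt]
          exact ih (some b)
    · have hb : point_inside_box (cx, cy) p = false := by
        simp only [point_inside_box, Bool.and_eq_false_iff, decide_eq_false_iff_not]
        tauto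
      rw [hb]
      rw [if_neg (by simp)]
      simp only [considerBox, if_neg hc]
      exact ih m

-- ===== VERDICT (by name: the statement is the Claim_ definition above) =====
theorem assign_face_to_person_spec : Claim_equal_assign_face_to_person := by
  intro face people _
  unfold Spec_assign_face_to_person
  obtain ⟨x, y, w, h⟩ := face
  simp only [assign_face_to_person, assign_face_to_person_alt, face_center]
  have hB := foldl_considerBox (x + PySem.Int.floordiv w 2) (y + PySem.Int.floordiv h 2) people none
  simp only [Option.map_none] at hB
  rw [hB]
  generalize people.filter (fun p =>
      point_inside_box (x + PySem.Int.floordiv w 2, y + PySem.Int.floordiv h 2) p) = cand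
  rw [PySem.List.sorted_eq_foldl_insertBy]
  rw [foldl_insertBy_head? cand []]
  cases cand with
  | nil => rfl
  | cons c t =>
    simp only [List.isEmpty_cons, List.head?_nil]
    rw [if_neg (by simp)]
    have hid : ∀ o : Option (Int × Int × Int × Int),
        Option.map (Prod.fst ∘ withArea) o = o := by
      intro o; cases o <;> simp [withArea]
    simp only [Option.map_map, hid]
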